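-- pv_equiv track=rewrite | github.com/youzhenxing/info_hub | trendradar/podcast/analyzer.py | _parse_prompt_content
-- ===== SOURCE A (Python) =====
-- def _parse_prompt_content(content: str) -> tuple[str, str]:
--     """
--     解析提示词文件内容
--
--     格式：
--     [system]
--     系统提示词...
--
--     [user]
--     用户提示词模板...
--     """
--     system_prompt = ""
--     user_prompt = ""
--
--     current_section = None
--     lines = []
--
--     for line in content.split("\n"):
--         stripped = line.strip()
--
--         # 跳过注释行
--         if stripped.startswith("#"):
--             continue
--
--         # 检测段落标记
--         if stripped.lower() == "[system]":
--             if current_section == "user":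
--                 user_prompt = "\n".join(lines).strip()
--             current_section = "system"
--             lines = []
--         elif stripped.lower() == "[user]":
--             if current_section == "system":
--                 system_prompt = "\n".join(lines).strip()
--             current_section = "user"
--             lines = []
--         else:
--             lines.append(line)
--
--     # 处理最后一个段落
--     if current_section == "system":
--         system_prompt = "\n".join(lines).strip()
--     elif current_section == "user":
--         user_prompt = "\n".join(lines).strip()
--
--     return system_prompt, user_prompt
-- ===== SOURCE B (Python) =====
-- def _parse_prompt_content(content: str) -> tuple[str, str]:
--     """Accumulate lines per section in a dict, finalize once at the end."""
--     sections = {}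
--     current = None
--     for line in content.split("\n"):
--         stripped = line.strip()
--         if stripped.startswith("#"):
--             continue
--         low = stripped.lower()
--         if low in ("[system]", "[user]"):
--             current = low
--             sections[current] = []
--         elif current is not None:
--             sections[current].append(line)
--     return (
--         "\n".join(sections.get("[system]", [])).strip(),
--         "\n".join(sections.get("[user]", [])).strip(),
--     )
-- ===== Notes on version B (the rewrite author's own statement) =====
-- stated objective: simpler
-- what changed: Replaces A's save-on-transition state machine (finalizing the previous section's text at each marker and again after the loop) with a single accumulate-then-finalize pass: a dict maps each marker to its list of lines (reset on a repeated marker) and both prompts are joined and stripped once at the end.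
import Mathlib
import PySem

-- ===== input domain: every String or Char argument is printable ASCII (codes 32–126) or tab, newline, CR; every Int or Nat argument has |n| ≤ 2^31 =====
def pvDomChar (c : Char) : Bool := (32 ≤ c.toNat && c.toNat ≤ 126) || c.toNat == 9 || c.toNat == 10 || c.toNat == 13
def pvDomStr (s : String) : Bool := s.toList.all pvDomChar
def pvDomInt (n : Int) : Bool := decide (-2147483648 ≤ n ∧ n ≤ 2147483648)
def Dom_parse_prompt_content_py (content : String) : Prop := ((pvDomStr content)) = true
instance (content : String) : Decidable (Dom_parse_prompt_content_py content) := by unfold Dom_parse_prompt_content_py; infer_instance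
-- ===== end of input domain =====

-- B accumulates per-section lines in a dict and joins/strips once at the end, instead of
-- A's save-on-transition state machine; objective: simpler (same O(n) cost).

-- ===== PORT A =====
-- state: (system_prompt, user_prompt, current_section, lines)
def pvAStep (st : String × String × Option String × List String) (line : String) :
    String × String × Option String × List String :=
  let (system_prompt, user_prompt, current_section, lines) := st
  let stripped := PySem.Str.strip line
  if PySem.Str.startswith stripped "#" then st
  else if PySem.Str.lower stripped = "[system]" then
    let user_prompt :=
      if current_section = some "user" then PySem.Str.strip (PySem.Str.join "\n" lines)
      else user_prompt
    (system_prompt, user_prompt, some "system", [])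
  else if PySem.Str.lower stripped = "[user]" then
    let system_prompt :=
      if current_section = some "system" then PySem.Str.strip (PySem.Str.join "\n" lines)
      else system_prompt
    (system_prompt, user_prompt, some "user", [])
  else
    (system_prompt, user_prompt, current_section, lines ++ [line])

def pvAFinish (st : String × String × Option String × List String) : String × String :=
  let (system_prompt, user_prompt, current_section, lines) := st
  if current_section = some "system" then
    (PySem.Str.strip (PySem.Str.join "\n" lines), user_prompt)
  else if current_section = some "user" then
    (system_prompt, PySem.Str.strip (PySem.Str.join "\n" lines))
  else (system_prompt, user_prompt)

-- content.split("\n"): split? is always `some` since the separator is the non-empty literal "\n"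
def parse_prompt_content_py (content : String) : String × String :=
  pvAFinish (((PySem.Str.split? content "\n").getD []).foldl pvAStep ("", "", none, []))

-- ===== PORT B =====
-- state: (sections, current)
def pvBStep (st : PySem.Dict String (List String) × Option String) (line : String) :
    PySem.Dict String (List String) × Option String :=
  let (sections, current) := st
  let stripped := PySem.Str.strip line
  if PySem.Str.startswith stripped "#" then st
  else
    let low := PySem.Str.lower stripped
    if low = "[system]" ∨ low = "[user]" then
      (sections.insert low [], some low)
    else
      match current with
      | some cur => (sections.modify cur [] (· ++ [line]), current)
      | none => st

def parse_prompt_content_py_alt (content : String) : String × String :=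
  let st := ((PySem.Str.split? content "\n").getD []).foldl pvBStep (PySem.Dict.empty, none)
  (PySem.Str.strip (PySem.Str.join "\n" (st.1.getD "[system]" [])),
   PySem.Str.strip (PySem.Str.join "\n" (st.1.getD "[user]" [])))

-- ===== PRECONDITION & SPEC =====
def Spec_parse_prompt_content_py (content : String) (out : String × String) : Prop := out = parse_prompt_content_py_alt content
instance (content : String) (out : String × String) : Decidable (Spec_parse_prompt_content_py content out) := by unfold Spec_parse_prompt_content_py; infer_instance

-- ===== CLAIM (what is proved, stated in full; the proofs are below) =====
def Claim_equal_parse_prompt_content_py : Prop := ∀ (content : String), Dom_parse_prompt_content_py content → Spec_parse_prompt_content_py content (parse_prompt_content_py content)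

-- ===== LEMMAS AND PROOFS =====

-- joined-and-stripped text of a section stored in B's dict
def pvFin (d : PySem.Dict String (List String)) (k : String) : String :=
  PySem.Str.strip (PySem.Str.join "\n" (d.getD k []))

-- relation between A's loop state and B's loop state
def pvInv (sp up : String) (cur : Option String) (lines : List String)
    (d : PySem.Dict String (List String)) (cur' : Option String) : Prop :=
  (cur = none ∧ cur' = none ∧ sp = pvFin d "[system]" ∧ up = pvFin d "[user]") ∨
  (cur = some "system" ∧ cur' = some "[system]" ∧ d.getD "[system]" [] = lines ∧ up = pvFin d "[user]") ∨
  (cur = some "user" ∧ cur' = some "[user]" ∧ d.getD "[user]" [] = lines ∧ sp = pvFin d "[system]")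

lemma pv_loop_equiv (ls : List String) (sp up : String) (cur : Option String)
    (lines : List String) (d : PySem.Dict String (List String)) (cur' : Option String)
    (hinv : pvInv sp up cur lines d cur') :
    pvAFinish (ls.foldl pvAStep (sp, up, cur, lines)) =
      (pvFin (ls.foldl pvBStep (d, cur')).1 "[system]",
       pvFin (ls.foldl pvBStep (d, cur')).1 "[user]") := by
  induction ls generalizing sp up cur lines d cur' with
  | nil =>
    simp only [List.foldl_nil]
    rcases hinv with ⟨h1, h2, h3, h4⟩ | ⟨h1, h2, h3, h4⟩ | ⟨h1, h2, h3, h4⟩ <;>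
      subst h1 h2 <;> simp [pvAFinish, pvFin, h3, h4]
  | cons l rest ih =>
    simp only [List.foldl_cons]
    have hneu : ("[user]" : String) ≠ "[system]" := by decide
    have hnes : ("[system]" : String) ≠ "[user]" := by decide
    by_cases hc : PySem.Chars.startswith (PySem.Chars.strip l.toList) ['#'] = true
    · rw [show pvAStep (sp, up, cur, lines) l = (sp, up, cur, lines) by
          simp [pvAStep, hc],
        show pvBStep (d, cur') l = (d, cur') by simp [pvBStep, hc]]
      exact ih _ _ _ _ _ _ hinv
    · by_cases hs : PySem.Str.lower (PySem.Str.strip l) = "[system]"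
      · rw [show pvAStep (sp, up, cur, lines) l =
            (sp, (if cur = some "user" then PySem.Str.strip (PySem.Str.join "\n" lines) else up),
             some "system", []) by simp [pvAStep, hc, hs],
          show pvBStep (d, cur') l = (d.insert "[system]" [], some "[system]") by
            simp [pvBStep, hc, hs]]
        apply ih
        rcases hinv with ⟨h1, h2, h3, h4⟩ | ⟨h1, h2, h3, h4⟩ | ⟨h1, h2, h3, h4⟩ <;>
          subst h1 <;>
          refine Or.inr (Or.inl ⟨rfl, rfl, PySem.Dict.getD_insert_self _ _ _ _, ?_⟩) <;>
          simp [pvFin, PySem.Dict.getD_insert_of_ne _ _ _ hneu, h3, h4]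
      · by_cases hu : PySem.Str.lower (PySem.Str.strip l) = "[user]"
        · rw [show pvAStep (sp, up, cur, lines) l =
              ((if cur = some "system" then PySem.Str.strip (PySem.Str.join "\n" lines) else sp), up,
               some "user", []) by simp [pvAStep, hc, hu],
            show pvBStep (d, cur') l = (d.insert "[user]" [], some "[user]") by
              simp [pvBStep, hc, hu]]
          apply ih
          rcases hinv with ⟨h1, h2, h3, h4⟩ | ⟨h1, h2, h3, h4⟩ | ⟨h1, h2, h3, h4⟩ <;>
            subst h1 <;>
            refine Or.inr (Or.inr ⟨rfl, rfl, PySem.Dict.getD_insert_self _ _ _ _, ?_⟩) <;>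
            simp [pvFin, PySem.Dict.getD_insert_of_ne _ _ _ hnes, h3, h4]
        · rw [show pvAStep (sp, up, cur, lines) l = (sp, up, cur, lines ++ [l]) by
              simp [pvAStep, hc, hs, hu]]
          rcases hinv with ⟨h1, h2, h3, h4⟩ | ⟨h1, h2, h3, h4⟩ | ⟨h1, h2, h3, h4⟩ <;> subst h1 h2
          · rw [show pvBStep (d, none) l = (d, none) by simp [pvBStep, hc, hs, hu]]
            exact ih _ _ _ _ _ _ (Or.inl ⟨rfl, rfl, h3, h4⟩)
          · rw [show pvBStep (d, some "[system]") l =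
                (d.modify "[system]" [] (· ++ [l]), some "[system]") by simp [pvBStep, hc, hs, hu]]
            apply ih
            refine Or.inr (Or.inl ⟨rfl, rfl, ?_, ?_⟩)
            · rw [PySem.Dict.getD_modify_self, h3]
            · simp [pvFin, PySem.Dict.getD_modify_of_ne _ _ _ hneu, h4]
          · rw [show pvBStep (d, some "[user]") l =
                (d.modify "[user]" [] (· ++ [l]), some "[user]") by simp [pvBStep, hc, hs, hu]]
            apply ih
            refine Or.inr (Or.inr ⟨rfl, rfl, ?_, ?_⟩)
            · rw [PySem.Dict.getD_modify_self, h3]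
            · simp [pvFin, PySem.Dict.getD_modify_of_ne _ _ _ hnes, h4]
-- ===== VERDICT (by name: the statement is the Claim_ definition above) =====
theorem parse_prompt_content_py_spec : Claim_equal_parse_prompt_content_py := by
  intro content _
  unfold Spec_parse_prompt_content_py parse_prompt_content_py parse_prompt_content_py_alt
  exact pv_loop_equiv ((PySem.Str.split? content "\n").getD []) "" "" none [] PySem.Dict.empty none
    (Or.inl ⟨rfl, rfl, by decide, by decide⟩)
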